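-- pv_equiv track=rewrite | github.com/SAIPAVANTM/MLA0111---AI | 4) Map_Integers.py | is_possible_encoding
-- ===== SOURCE A (Python) =====
-- def is_possible_encoding(arr, S):
--   seen_chars = set()
--   char_map = {}
--
--   for char in arr + list(S):
--     if char in char_map:
--       if char_map[char] != len(seen_chars):
--         return False
--     else:
--       char_map[char] = len(seen_chars)
--       seen_chars.add(char)  # Add character to seen set
--   return True
-- ===== SOURCE B (Python) =====
-- def is_possible_encoding(arr, S):
--     combined = sorted(arr + list(S))
--     return all(a != b for a, b in zip(combined, combined[1:]))
-- ===== Notes on version B (the rewrite author's own statement) =====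
-- stated objective: alternative
-- what changed: A's single pass with a dict of first-seen indices and an early return is replaced by a sort-then-adjacent-scan: sort the combined sequence and check that no two neighbouring elements are equal (A returns True iff all elements are distinct, and in a sorted list duplicates are adjacent).
import Mathlib
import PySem

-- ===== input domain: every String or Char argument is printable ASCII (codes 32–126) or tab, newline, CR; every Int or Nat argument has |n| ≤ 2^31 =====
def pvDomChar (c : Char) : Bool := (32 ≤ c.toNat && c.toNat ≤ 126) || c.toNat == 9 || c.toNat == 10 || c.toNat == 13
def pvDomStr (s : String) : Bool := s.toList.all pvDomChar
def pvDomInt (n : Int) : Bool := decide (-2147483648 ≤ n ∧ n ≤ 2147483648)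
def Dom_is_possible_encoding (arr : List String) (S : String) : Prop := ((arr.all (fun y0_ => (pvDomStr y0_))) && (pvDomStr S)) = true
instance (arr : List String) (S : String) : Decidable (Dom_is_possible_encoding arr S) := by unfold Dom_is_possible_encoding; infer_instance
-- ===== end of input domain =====

-- B replaces A's dict-tracking single pass with early return by sort-then-adjacent-scan (alternative algorithm, O(n log n)).

-- ===== PORT A =====
-- the loop 'for char in arr + list(S)' with early 'return False'
def pvLoopA : List String → PySem.Set String → PySem.Dict String Int → Bool
  | [], _, _ => true
  | c :: rest, seen, m =>
    if m.contains c then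
      if (m.getD c 0) ≠ (seen.length : Int) then false
      else pvLoopA rest seen m
    else pvLoopA rest (PySem.Set.add seen c) (m.insert c (seen.length : Int))

def is_possible_encoding (arr : List String) (S : String) : Bool :=
  pvLoopA (arr ++ S.toList.map (fun c => String.ofList [c])) PySem.Set.empty PySem.Dict.empty

-- ===== PORT B =====
-- combined = sorted(arr + list(S)); all(a != b for a, b in zip(combined, combined[1:]))
def is_possible_encoding_alt (arr : List String) (S : String) : Bool :=
  let combined := PySem.List.sorted (arr ++ S.toList.map (fun c => String.ofList [c])) (fun x => x) false
  (combined.zip (PySem.List.slice combined (some 1) none)).all (fun p => p.1 != p.2)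

-- ===== PRECONDITION & SPEC =====
def Spec_is_possible_encoding (arr : List String) (S : String) (out : Bool) : Prop := out = is_possible_encoding_alt arr S
instance (arr : List String) (S : String) (out : Bool) : Decidable (Spec_is_possible_encoding arr S out) := by unfold Spec_is_possible_encoding; infer_instance

-- ===== CLAIM (what is proved, stated in full; the proofs are below) =====
def Claim_equal_is_possible_encoding : Prop := ∀ (arr : List String) (S : String), Dom_is_possible_encoding arr S → Spec_is_possible_encoding arr S (is_possible_encoding arr S)

-- ===== LEMMAS AND PROOFS =====

-- A's loop: under the invariant that the dict's keys are exactly the seen set and every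
-- stored index is strictly below the current |seen|, the loop decides "rest is duplicate-free
-- and disjoint from seen".
lemma pvLoopA_spec (rest : List String) (seen : PySem.Set String) (m : PySem.Dict String Int)
    (hkeys : ∀ c, m.contains c = true ↔ c ∈ seen)
    (hval : ∀ c v, m.get? c = some v → v < (seen.length : Int)) :
    pvLoopA rest seen m = decide (rest.Nodup ∧ ∀ x ∈ rest, x ∉ seen) := by
  induction rest generalizing seen m with
  | nil => simp [pvLoopA]
  | cons c rest ih =>
    by_cases hc : m.contains c = true
    · -- c already in the map, hence already seen: stored value < |seen|, so the test fires
      have hcseen : c ∈ seen := (hkeys c).1 hc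
      obtain ⟨v, hv⟩ : ∃ v, m.get? c = some v := by
        cases hm : m.get? c with
        | none => rw [PySem.Dict.get?_eq_none_iff_contains] at hm; simp [hm] at hc
        | some v => exact ⟨v, rfl⟩
      have hlt := hval c v hv
      have hgd : m.getD c 0 = v := PySem.Dict.getD_of_get?_eq_some m 0 hv
      simp only [pvLoopA, hc, if_true, hgd]
      rw [if_pos (by omega)]
      simp [hcseen]
    · -- fresh element: add it, extend the map with the current |seen|
      have hcs : c ∉ seen := fun h => hc ((hkeys c).2 h)
      rw [pvLoopA, if_neg (by simp [hc])]
      rw [ih (PySem.Set.add seen c) (m.insert c (seen.length : Int))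
        (fun c' => by
          rw [PySem.Dict.contains_insert, PySem.Set.mem_add]
          constructor
          · intro h
            rcases Bool.or_eq_true_iff.1 h with h | h
            · exact Or.inr (eq_of_beq h)
            · exact Or.inl ((hkeys c').1 h)
          · intro h
            rcases h with h | h
            · exact Bool.or_eq_true_iff.2 (Or.inr ((hkeys c').2 h))
            · exact Bool.or_eq_true_iff.2 (Or.inl (by simp [h])))
        (fun c' v hv => by
          rw [PySem.Set.add_of_not_mem hcs]
          rw [PySem.Dict.get?_insert] at hv
          simp only [List.length_append, List.length_singleton]
          split at hv
          · cases hv; push_cast; omega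
          · have := hval c' v hv; push_cast; omega)]
      apply decide_eq_decide.2
      simp only [List.nodup_cons, List.mem_cons, PySem.Set.mem_add]
      constructor
      · rintro ⟨hnd, hall⟩
        refine ⟨⟨fun hcr => (hall c hcr) (Or.inr rfl), hnd⟩, ?_⟩
        rintro x (rfl | hx)
        · exact hcs
        · exact fun hxs => (hall x hx) (Or.inl hxs)
      · rintro ⟨⟨hcr, hnd⟩, hall⟩
        refine ⟨hnd, fun x hx => ?_⟩
        rintro (hxs | rfl)
        · exact hall x (Or.inr hx) hxs
        · exact hcr hx

-- B's adjacent scan decides "no two neighbouring elements are equal" (IsChain (≠)).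
lemma zip_tail_all_ne : ∀ (s : List String),
    ((s.zip s.tail).all (fun p => p.1 != p.2) = true) ↔ s.IsChain (fun a b => a ≠ b)
  | [] => by simp
  | [a] => by simp
  | a :: b :: u => by
    have ih := zip_tail_all_ne (b :: u)
    simp only [List.tail_cons, List.zip_cons_cons, List.all_cons, Bool.and_eq_true,
      bne_iff_ne, List.isChain_cons_cons] at *
    rw [ih]

-- a Pairwise list is in particular a chain
lemma isChain_of_pairwise {α : Type} {R : α → α → Prop} : ∀ {l : List α}, l.Pairwise R → l.IsChain R
  | [], _ => List.isChain_nil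
  | [a], _ => List.isChain_singleton a
  | _ :: b :: u, h => by
    rw [List.isChain_cons_cons]
    rw [List.pairwise_cons] at h
    exact ⟨h.1 b (by simp), isChain_of_pairwise h.2⟩

-- adjacent '≤' plus adjacent '≠' is adjacent '<'
lemma chain_lt_of_le_ne : ∀ (s : List String), s.IsChain (fun a b => a ≤ b) →
    s.IsChain (fun a b => a ≠ b) → s.IsChain (fun a b => a < b)
  | [], _, _ => List.isChain_nil
  | [a], _, _ => List.isChain_singleton a
  | a :: b :: u, hle, hne => by
    rw [List.isChain_cons_cons] at *
    exact ⟨lt_of_le_of_ne hle.1 hne.1, chain_lt_of_le_ne (b :: u) hle.2 hne.2⟩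

-- on a weakly sorted list, no equal neighbours ↔ no duplicates at all
lemma chain_ne_iff_nodup (s : List String) (hle : s.IsChain (fun a b => a ≤ b)) :
    s.IsChain (fun a b => a ≠ b) ↔ s.Nodup := by
  constructor
  · intro hne
    have hlt := chain_lt_of_le_ne s hle hne
    have hpw : s.Pairwise (fun a b => a < b) := List.isChain_iff_pairwise.mp hlt
    exact hpw.imp (fun h => ne_of_lt h)
  · intro hnd
    exact isChain_of_pairwise hnd

-- ===== VERDICT (by name: the statement is the Claim_ definition above) =====
theorem is_possible_encoding_spec : Claim_equal_is_possible_encoding := by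
  intro arr S _
  unfold Spec_is_possible_encoding
  simp only [is_possible_encoding, is_possible_encoding_alt]
  set combined := arr ++ S.toList.map (fun c => String.ofList [c]) with hcomb
  rw [pvLoopA_spec combined PySem.Set.empty PySem.Dict.empty
    (fun c => by simp [PySem.Dict.contains_empty, PySem.Set.empty])
    (fun c v hv => by simp [PySem.Dict.get?_empty] at hv)]
  rw [PySem.List.slice_from_one]
  have hperm : (PySem.List.sorted combined (fun x => x) false).Perm combined :=
    PySem.List.sorted_perm combined (fun x => x) false
  have hle : (PySem.List.sorted combined (fun x => x) false).IsChain (fun a b => a ≤ b) :=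
    isChain_of_pairwise (PySem.List.sorted_pairwise combined (fun x => x))
  rw [Bool.eq_iff_iff, decide_eq_true_iff, zip_tail_all_ne,
    chain_ne_iff_nodup _ hle, hperm.nodup_iff]
  simp [PySem.Set.empty]
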